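-- pv_equiv track=rewrite | github.com/Mythicool/sugarcereal | dist/fancy_serial_analyzer.py | check_of_a_kind
-- ===== SOURCE A (Python) =====
-- from collections import Counter, defaultdict
--
-- def digit_counts(digits):
--     return Counter(digits)
--
-- def find_runs(digits):
--     results = []
--     i = 0
--     while i < len(digits):
--         j = i
--         while j < len(digits) and digits[j] == digits[i]:
--             j += 1
--         run_len = j - i
--         if run_len >= 3:
--             results.append((run_len, digits[i], i))
--         i = j
--     return results  # [(length, digit, start_pos), ...]
--
-- def check_of_a_kind(digits):
--     patterns = []
--     c = digit_counts(digits)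
--     runs = find_runs(digits)
--     max_run_by_digit = {}
--     for run_len, d, _ in runs:
--         prev = max_run_by_digit.get(d, 0)
--         if run_len > prev:
--             max_run_by_digit[d] = run_len
--     for d, n in c.items():
--         # Only report if not already represented as an equal-length solid run.
--         max_run = max_run_by_digit.get(d, 0)
--         if n >= 3 and max_run < n:
--             label = {3: "3 OF A KIND", 4: "4 OF A KIND", 5: "5 OF A KIND",
--                      6: "6 OF A KIND", 7: "7 OF A KIND", 8: "8 OF A KIND"}.get(n)
--             if label:
--                 patterns.append((label, d))
--     return patterns
-- ===== SOURCE B (Python) =====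
-- from collections import Counter
--
-- _LABELS = {3: "3 OF A KIND", 4: "4 OF A KIND", 5: "5 OF A KIND",
--            6: "6 OF A KIND", 7: "7 OF A KIND", 8: "8 OF A KIND"}
--
-- def _first_block_len(digits, d):
--     # length of the first maximal block of consecutive d's in digits
--     n = 0
--     for x in digits:
--         if x == d:
--             n += 1
--         elif n:
--             break
--     return n
--
-- def check_of_a_kind(digits):
--     patterns = []
--     for d, n in Counter(digits).items():
--         label = _LABELS.get(n)
--         if label is not None and _first_block_len(digits, d) < n:
--             patterns.append((label, d))
--     return patterns
-- ===== Notes on version B (the rewrite author's own statement) =====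
-- stated objective: simpler
-- what changed: Replaces A's explicit index-based run-finding loop and max-run-per-digit table by a single per-digit test: a digit with a labelled count (3..8) is reported iff its first maximal block of consecutive occurrences is shorter than its total count, which is provably equivalent to 'no solid run equals the count'; B rescans the list once per reported-candidate digit, so it is plainer but not faster.
import Mathlib
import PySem

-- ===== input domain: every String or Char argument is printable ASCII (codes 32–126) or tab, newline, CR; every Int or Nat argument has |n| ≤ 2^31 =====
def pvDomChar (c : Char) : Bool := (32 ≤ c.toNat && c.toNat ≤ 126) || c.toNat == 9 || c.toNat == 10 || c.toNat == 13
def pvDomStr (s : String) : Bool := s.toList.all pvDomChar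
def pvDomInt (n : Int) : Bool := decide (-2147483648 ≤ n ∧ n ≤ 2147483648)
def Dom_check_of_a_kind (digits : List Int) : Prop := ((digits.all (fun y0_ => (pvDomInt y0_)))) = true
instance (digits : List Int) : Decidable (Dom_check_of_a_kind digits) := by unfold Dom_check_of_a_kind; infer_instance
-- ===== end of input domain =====

-- B replaces A's run-finding loop + per-digit max-run table by a single "first solid
-- block shorter than the total count" test per distinct digit (objective: simpler).

-- ===== PORT A =====
-- inner while loop of find_runs: advance j while j < len and digits[j] == digits[i];
-- indices are nonnegative and guarded in range, so digits[j] is ported as getD;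
-- fuel = digits.length - j only makes the same computation total (structural recursion)
def frInner (digits : List Int) (p : Int) (fuel j : Nat) : Nat :=
  match fuel with
  | 0 => j
  | fuel + 1 =>
      if j < digits.length ∧ digits.getD j 0 = p then frInner digits p fuel (j + 1) else j

-- outer while loop of find_runs (fuel = digits.length - i, a totality guard only)
def frOuter (digits : List Int) (fuel i : Nat) (results : List (Nat × Int × Nat)) :
    List (Nat × Int × Nat) :=
  match fuel with
  | 0 => results
  | fuel + 1 =>
      if i < digits.length then
        let j := frInner digits (digits.getD i 0) (digits.length - i) i
        let runLen := j - i
        frOuter digits fuel j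
          (if 3 ≤ runLen then results ++ [(runLen, digits.getD i 0, i)] else results)
      else results

def ofaLabels : PySem.Dict Int String :=
  PySem.Dict.ofList [(3, "3 OF A KIND"), (4, "4 OF A KIND"), (5, "5 OF A KIND"),
                     (6, "6 OF A KIND"), (7, "7 OF A KIND"), (8, "8 OF A KIND")]

def check_of_a_kind (digits : List Int) : List (String × Int) :=
  let c := PySem.Dict.counter digits
  let runs := frOuter digits digits.length 0 []
  let maxRunByDigit : PySem.Dict Int Nat :=
    runs.foldl (fun t r => if t.getD r.2.1 0 < r.1 then t.insert r.2.1 r.1 else t)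
      PySem.Dict.empty
  c.items.foldl (fun patterns p =>
    let maxRun := maxRunByDigit.getD p.1 0
    if (3:Int) ≤ p.2 ∧ (maxRun : Int) < p.2 then
      match ofaLabels.get? p.2 with
      | some label => patterns ++ [(label, p.1)]
      | none => patterns
    else patterns) []

-- ===== PORT B =====
-- _LABELS.get(n): a lookup in the literal module dict, ported by hand as a total
-- lookup function (exact for this dict: distinct literal keys 3..8)
def altLabel (n : Int) : Option String :=
  if n = 3 then some "3 OF A KIND" else if n = 4 then some "4 OF A KIND"
  else if n = 5 then some "5 OF A KIND" else if n = 6 then some "6 OF A KIND"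
  else if n = 7 then some "7 OF A KIND" else if n = 8 then some "8 OF A KIND"
  else none

-- _first_block_len's loop
def firstBlockLen (digits : List Int) (d : Int) (n : Nat) : Nat :=
  match digits with
  | [] => n
  | x :: xs => if x = d then firstBlockLen xs d (n + 1) else if n ≠ 0 then n else firstBlockLen xs d n

def check_of_a_kind_alt (digits : List Int) : List (String × Int) :=
  (PySem.Dict.counter digits).items.foldl (fun patterns p =>
    match altLabel p.2 with
    | some label =>
        if ((firstBlockLen digits p.1 0 : Int) < p.2) then patterns ++ [(label, p.1)]
        else patterns
    | none => patterns) []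

-- ===== PRECONDITION & SPEC =====
def Spec_check_of_a_kind (digits : List Int) (out : List (String × Int)) : Prop := out = check_of_a_kind_alt digits
instance (digits : List Int) (out : List (String × Int)) : Decidable (Spec_check_of_a_kind digits out) := by unfold Spec_check_of_a_kind; infer_instance

-- ===== CLAIM (what is proved, stated in full; the proofs are below) =====
def Claim_equal_check_of_a_kind : Prop := ∀ (digits : List Int), Dom_check_of_a_kind digits → Spec_check_of_a_kind digits (check_of_a_kind digits)

-- ===== LEMMAS AND PROOFS =====

-- semantic run list with start positions, structurally
def runsFrom (l : List Int) (i : Nat) : List (Nat × Int × Nat) :=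
  match l with
  | [] => []
  | a :: t =>
      let k := (t.takeWhile (· == a)).length + 1
      (if 3 ≤ k then [(k, a, i)] else []) ++ runsFrom (t.dropWhile (· == a)) (i + k)
termination_by l.length
decreasing_by simp only [List.length_cons]; have := t.length_dropWhile_le (p := (· == a)); omega

-- maximal length of a run of d of length ≥ 3, folded structurally
def mrMax (l : List Int) (d : Int) (m : Nat) : Nat :=
  match l with
  | [] => m
  | a :: t =>
      let k := (t.takeWhile (· == a)).length + 1
      mrMax (t.dropWhile (· == a)) d (if a = d ∧ 3 ≤ k then max m k else m)
termination_by l.length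
decreasing_by simp only [List.length_cons]; have := t.length_dropWhile_le (p := (· == a)); omega

theorem drop_len_takeWhile (p : Int → Bool) (l : List Int) :
    l.drop ((l.takeWhile p).length) = l.dropWhile p := by
  induction l with
  | nil => rfl
  | cons a t ih =>
      by_cases hpa : p a <;> simp [List.takeWhile_cons, List.dropWhile_cons, hpa, ih]

theorem runsFrom_cons (a : Int) (t : List Int) (i : Nat) :
    runsFrom (a :: t) i
      = (if 3 ≤ (t.takeWhile (· == a)).length + 1
          then [((t.takeWhile (· == a)).length + 1, a, i)] else [])
        ++ runsFrom (t.dropWhile (· == a)) (i + ((t.takeWhile (· == a)).length + 1)) := by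
  rw [runsFrom]

theorem mrMax_cons (a : Int) (t : List Int) (d : Int) (m : Nat) :
    mrMax (a :: t) d m
      = mrMax (t.dropWhile (· == a)) d
          (if a = d ∧ 3 ≤ (t.takeWhile (· == a)).length + 1
            then max m ((t.takeWhile (· == a)).length + 1) else m) := by
  rw [mrMax]

theorem frInner_eq (digits : List Int) (p : Int) (fuel : Nat) :
    ∀ j, digits.length - j ≤ fuel →
      frInner digits p fuel j = j + ((digits.drop j).takeWhile (· == p)).length := by
  induction fuel with
  | zero =>
      intro j hf
      have hd : digits.drop j = [] := List.drop_eq_nil_of_le (by omega)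
      simp [frInner, hd]
  | succ fuel ih =>
      intro j hf
      simp only [frInner]
      by_cases h : j < digits.length ∧ digits.getD j 0 = p
      · rw [if_pos h]
        obtain ⟨hjl, hv⟩ := h
        rw [ih (j + 1) (by omega), List.drop_eq_getElem_cons hjl]
        have hpj : digits[j] = p := by rw [← hv]; simp [List.getD_eq_getElem?_getD, hjl]
        simp [List.takeWhile, hpj]
        omega
      · rw [if_neg h]
        rcases Nat.lt_or_ge j digits.length with hjl | hjl
        · have hnv : ¬ digits.getD j 0 = p := fun hv => h ⟨hjl, hv⟩
          rw [List.drop_eq_getElem_cons hjl]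
          have hne : (digits[j] == p) = false := by
            simp [List.getD_eq_getElem?_getD, hjl] at hnv; simp [hnv]
          simp [List.takeWhile, hne]
        · simp [List.drop_eq_nil_of_le hjl]

theorem frOuter_eq (digits : List Int) (fuel : Nat) :
    ∀ i res, digits.length - i ≤ fuel →
      frOuter digits fuel i res = res ++ runsFrom (digits.drop i) i := by
  induction fuel with
  | zero =>
      intro i res hf
      have hd : digits.drop i = [] := List.drop_eq_nil_of_le (by omega)
      simp [frOuter, hd, runsFrom]
  | succ fuel ih =>
      intro i res hf
      simp only [frOuter]
      by_cases h : i < digits.length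
      · rw [if_pos h]
        have hv : digits.getD i 0 = digits[i] := by simp [List.getD_eq_getElem?_getD, h]
        have hdrop : digits.drop i = digits[i] :: digits.drop (i + 1) := List.drop_eq_getElem_cons h
        have htl : ((digits.drop i).takeWhile (· == digits.getD i 0)).length
            = ((digits.drop (i + 1)).takeWhile (· == digits[i])).length + 1 := by
          rw [hdrop, hv, List.takeWhile_cons, if_pos (by simp)]
          simp only [List.length_cons]
        have hj : frInner digits (digits.getD i 0) (digits.length - i) i
            = i + (((digits.drop (i + 1)).takeWhile (· == digits[i])).length + 1) := by
          rw [frInner_eq digits (digits.getD i 0) (digits.length - i) i (Nat.le_refl _), htl]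
        have hdj : digits.drop
              (i + (((digits.drop (i + 1)).takeWhile (· == digits[i])).length + 1))
            = (digits.drop (i + 1)).dropWhile (· == digits[i]) := by
          rw [← drop_len_takeWhile (· == digits[i]) (digits.drop (i + 1)), List.drop_drop]
          congr 1
          omega
        rw [hj, ih _ _ (by omega), hdj, hdrop, runsFrom_cons, hv]
        have hsub : i + (((digits.drop (i + 1)).takeWhile (· == digits[i])).length + 1) - i
            = ((digits.drop (i + 1)).takeWhile (· == digits[i])).length + 1 := by omega
        rw [hsub]
        by_cases h3 : 3 ≤ ((digits.drop (i + 1)).takeWhile (· == digits[i])).length + 1 <;>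
          simp [h3]
      · rw [if_neg h]
        have hd : digits.drop i = [] := List.drop_eq_nil_of_le (by omega)
        simp [hd, runsFrom]

theorem table_getD (rs : List (Nat × Int × Nat)) (t : PySem.Dict Int Nat) (d : Int) :
    (rs.foldl (fun t r => if t.getD r.2.1 0 < r.1 then t.insert r.2.1 r.1 else t) t).getD d 0
      = rs.foldl (fun m r => if r.2.1 = d then max m r.1 else m) (t.getD d 0) := by
  induction rs generalizing t with
  | nil => rfl
  | cons r rs ih =>
      simp only [List.foldl_cons]
      rw [ih]
      congr 1
      rcases eq_or_ne r.2.1 d with hd | hd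
      · subst hd
        by_cases hlt : t.getD r.2.1 0 < r.1
        · simp [hlt, PySem.Dict.getD_insert_self]
          omega
        · simp [hlt]
          omega
      · by_cases hlt : t.getD r.2.1 0 < r.1
        · simp [hlt, PySem.Dict.getD_insert, Ne.symm hd, hd]
        · simp [hlt, hd]

theorem runsFold_eq_mrMax (l : List Int) (i : Nat) (d : Int) (m : Nat) :
    (runsFrom l i).foldl (fun m r => if r.2.1 = d then max m r.1 else m) m = mrMax l d m := by
  induction hl : l.length using Nat.strong_induction_on generalizing l i m with
  | _ len ih =>
    cases l with
    | nil => simp [runsFrom, mrMax]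
    | cons a t =>
      subst hl
      have hrlen : (t.dropWhile (· == a)).length < (a :: t).length := by
        have := t.length_dropWhile_le (p := (· == a)); simp; omega
      rw [runsFrom_cons, mrMax_cons, List.foldl_append,
        ih _ hrlen _ _ _ rfl]
      congr 1
      by_cases h3 : 3 ≤ (t.takeWhile (· == a)).length + 1
      · rw [if_pos h3]
        by_cases hd : a = d
        · rw [if_pos ⟨hd, h3⟩]
          simp [hd]
        · rw [if_neg (fun hc => hd hc.1)]
          simp [hd]
      · rw [if_neg h3, if_neg (fun hc => h3 hc.2)]
        simp

theorem mrMax_of_count_zero (l : List Int) (d : Int) (m : Nat) (h : l.count d = 0) :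
    mrMax l d m = m := by
  revert h
  induction hl : l.length using Nat.strong_induction_on generalizing l m with
  | _ len ih =>
    intro h
    cases l with
    | nil => simp [mrMax]
    | cons a t =>
      subst hl
      have ha : ¬ a = d := by
        intro he; subst he; simp [List.count_cons] at h
      have hrlen : (t.dropWhile (· == a)).length < (a :: t).length := by
        have := t.length_dropWhile_le (p := (· == a)); simp; omega
      have hc : (t.dropWhile (· == a)).count d = 0 := by
        have hsp : (t.takeWhile (· == a)).count d + (t.dropWhile (· == a)).count d
            = t.count d := by
          rw [← List.count_append, List.takeWhile_append_dropWhile]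
        have h2 : t.count d = 0 := by
          rw [List.count_cons] at h
          have hne : (a == d) = false := by simp [ha]
          rw [hne] at h
          simpa using h
        omega
      rw [mrMax_cons, ih _ hrlen _ _ rfl hc]
      simp [ha]

theorem mrMax_le (l : List Int) (d : Int) (m : Nat) :
    mrMax l d m ≤ max m (l.count d) := by
  induction hl : l.length using Nat.strong_induction_on generalizing l m with
  | _ len ih =>
    cases l with
    | nil => simp [mrMax]
    | cons a t =>
      subst hl
      have hrlen : (t.dropWhile (· == a)).length < (a :: t).length := by
        have := t.length_dropWhile_le (p := (· == a)); simp; omega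
      have hsplit : t.count d = (t.takeWhile (· == a)).count d + (t.dropWhile (· == a)).count d := by
        rw [← List.count_append, List.takeWhile_append_dropWhile]
      rw [mrMax_cons]
      refine le_trans (ih _ hrlen _ _ rfl) ?_
      by_cases hd : a = d
      · subst hd
        have htk : (t.takeWhile (· == a)).count a = (t.takeWhile (· == a)).length := by
          rw [List.count_eq_length.mpr]
          intro x hx
          have hxa : x = a := by simpa using List.mem_takeWhile_imp hx
          exact hxa.symm
        have hcnt : (a :: t).count a = ((t.takeWhile (· == a)).length + 1) + (t.dropWhile (· == a)).count a := by
          simp [List.count_cons, hsplit, htk]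
          omega
        by_cases h3 : 3 ≤ (t.takeWhile (· == a)).length + 1 <;>
          simp [h3, hcnt] <;> omega
      · have htk : (t.takeWhile (· == a)).count d = 0 := by
          rw [List.count_eq_zero]
          intro hx
          have hxa := List.mem_takeWhile_imp hx
          simp at hxa
          exact hd (by rw [hxa])
        have hcnt : (a :: t).count d = (t.dropWhile (· == a)).count d := by
          simp [List.count_cons, hsplit, htk, hd]
        simp [hd, hcnt]

theorem firstBlockLen_pos (l : List Int) (d : Int) (n : Nat) (h : 0 < n) :
    firstBlockLen l d n = n + (l.takeWhile (· == d)).length := by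
  induction l generalizing n with
  | nil => simp [firstBlockLen]
  | cons x xs ih =>
      by_cases hx : x = d
      · rw [firstBlockLen, if_pos hx, ih (n + 1) (by omega)]
        simp [List.takeWhile, hx]; omega
      · have : (x == d) = false := by simp [hx]
        rw [firstBlockLen, if_neg hx, if_pos (by omega)]
        simp [List.takeWhile, this]

theorem firstBlockLen_skip (s l : List Int) (d : Int) (h : ∀ x ∈ s, x ≠ d) :
    firstBlockLen (s ++ l) d 0 = firstBlockLen l d 0 := by
  induction s with
  | nil => rfl
  | cons x xs ih =>
      have hx : ¬ x = d := h x (by simp)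
      rw [List.cons_append, firstBlockLen, if_neg hx, if_neg (by omega)]
      exact ih (fun y hy => h y (by simp [hy]))

-- the key equivalence: max solid run (≥3) < count  ⟺  first solid block < count
theorem key_lemma (l : List Int) (d : Int) (h3 : 3 ≤ l.count d) :
    (mrMax l d 0 < l.count d ↔ firstBlockLen l d 0 < l.count d) := by
  revert h3
  induction hl : l.length using Nat.strong_induction_on generalizing l with
  | _ len ih =>
    intro h3
    cases l with
    | nil => simp at h3
    | cons a t =>
      subst hl
      set s := t.takeWhile (· == a) with hs
      set r := t.dropWhile (· == a) with hr
      have hts : t = s ++ r := (List.takeWhile_append_dropWhile).symm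
      have hrlen : r.length < (a :: t).length := by
        have := t.length_dropWhile_le (p := (· == a))
        simp only [hr, List.length_cons]
        omega
      have hsall : ∀ x ∈ s, x = a := by
        intro x hx
        have := List.mem_takeWhile_imp (hs ▸ hx)
        simpa using this
      have hsplit : t.count d = s.count d + r.count d := by
        conv_lhs => rw [hts]
        simp [List.count_append]
      set k := s.length + 1 with hk
      by_cases hd : a = d
      · subst hd
        have hsc : s.count a = s.length := by
          rw [List.count_eq_length.mpr]
          intro x hx
          exact (hsall x hx).symm
        have hcnt : (a :: t).count a = k + r.count a := by
          simp [List.count_cons, hsplit, hsc, hk]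
          omega
        have hfbl : firstBlockLen (a :: t) a 0 = k := by
          rw [firstBlockLen, if_pos rfl, firstBlockLen_pos t a 1 (by omega)]
          simp [hk, hs]
          omega
        have hmr : mrMax (a :: t) a 0 = mrMax r a (if 3 ≤ k then k else 0) := by
          rw [mrMax_cons, ← hr, ← hs, ← hk]
          congr 1
          by_cases h3k : 3 ≤ k <;> simp [h3k]
        by_cases hrc : r.count a = 0
        · have hn : (a :: t).count a = k := by omega
          have h3k : 3 ≤ k := by omega
          rw [hmr, mrMax_of_count_zero r a _ hrc, hfbl, hn]
          simp [h3k]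
        · have hmle : mrMax r a (if 3 ≤ k then k else 0) ≤ max (if 3 ≤ k then k else 0) (r.count a) :=
            mrMax_le r a _
          constructor
          · intro _
            rw [hfbl, hcnt]
            omega
          · intro _
            rw [hmr, hcnt]
            by_cases h3k : 3 ≤ k <;> simp [h3k] at hmle ⊢ <;> omega
      · have hsc : s.count d = 0 := by
          rw [List.count_eq_zero]
          intro hx
          exact hd ((hsall d hx).symm)
        have hcnt : (a :: t).count d = r.count d := by
          simp [List.count_cons, hsplit, hsc, hd]
        have hfbl : firstBlockLen (a :: t) d 0 = firstBlockLen r d 0 := by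
          rw [firstBlockLen, if_neg hd, if_neg (by omega)]
          conv_lhs => rw [hts]
          exact firstBlockLen_skip s r d (fun x hx he => hd (((hsall x hx) ▸ he : a = d)))
        have hmr : mrMax (a :: t) d 0 = mrMax r d 0 := by
          rw [mrMax_cons, ← hr]
          congr 1
          simp [hd]
        rw [hfbl, hmr, hcnt]
        exact ih r.length hrlen r rfl (hcnt ▸ h3)

theorem altLabel_cases (n : Int) :
    altLabel n = none ∨ (3 ≤ n ∧ n ≤ 8 ∧ (altLabel n).isSome) := by
  unfold altLabel
  split_ifs with h1 h2 h3 h4 h5 h6 <;>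
    first
      | (right; exact ⟨by omega, by omega, rfl⟩)
      | (left; rfl)

theorem ofaLabels_get?_eq (n : Int) : ofaLabels.get? n = altLabel n := by
  by_cases h3 : n = 3; · subst h3; decide
  by_cases h4 : n = 4; · subst h4; decide
  by_cases h5 : n = 5; · subst h5; decide
  by_cases h6 : n = 6; · subst h6; decide
  by_cases h7 : n = 7; · subst h7; decide
  by_cases h8 : n = 8; · subst h8; decide
  have hmk : ofaLabels = PySem.Dict.mk [(3, "3 OF A KIND"), (4, "4 OF A KIND"), (5, "5 OF A KIND"),
      (6, "6 OF A KIND"), (7, "7 OF A KIND"), (8, "8 OF A KIND")] := by decide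
  have hnone : ofaLabels.get? n = none := by
    rw [hmk]
    simp [PySem.Dict.get?]
    omega
  rw [hnone]
  simp [altLabel, h3, h4, h5, h6, h7, h8]

-- ===== VERDICT (by name: the statement is the Claim_ definition above) =====
theorem check_of_a_kind_spec : Claim_equal_check_of_a_kind := by
  intro digits _
  unfold Spec_check_of_a_kind check_of_a_kind check_of_a_kind_alt
  simp only [PySem.Dict.items_counter]
  rw [List.foldl_map, List.foldl_map]
  apply PySem.List.foldl_congr_mem
  intro acc d hd
  simp only []
  have hmax : ((frOuter digits digits.length 0 []).foldl
      (fun (t : PySem.Dict Int Nat) r => if t.getD r.2.1 0 < r.1 then t.insert r.2.1 r.1 else t)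
      PySem.Dict.empty).getD d 0 = mrMax digits d 0 := by
    rw [table_getD, frOuter_eq digits digits.length 0 [] (by omega)]
    simp only [List.drop_zero, PySem.Dict.getD_empty]
    exact runsFold_eq_mrMax digits 0 d 0
  rw [hmax, ofaLabels_get?_eq]
  rcases altLabel_cases (digits.count d : Int) with hnone | ⟨hge3, _, hsome⟩
  · rw [hnone]
    rcases Nat.lt_or_ge (digits.count d) 3 with hlt | hge
    · have : ¬ (3 ≤ (digits.count d : Int) ∧ (mrMax digits d 0 : Int) < (digits.count d : Int)) := by
        push_neg; intro h; omega
      simp [this]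
    · have h3 : 3 ≤ (digits.count d : Int) := by exact_mod_cast hge
      by_cases hmr : (mrMax digits d 0 : Int) < (digits.count d : Int) <;> simp [hmr, h3]
  · obtain ⟨lbl, hlbl⟩ := Option.isSome_iff_exists.mp hsome
    rw [hlbl]
    have h3n : 3 ≤ digits.count d := by exact_mod_cast hge3
    have hiff := key_lemma digits d h3n
    by_cases hmr : mrMax digits d 0 < digits.count d
    · have hf : firstBlockLen digits d 0 < digits.count d := hiff.mp hmr
      have hmr' : (mrMax digits d 0 : Int) < (digits.count d : Int) := by exact_mod_cast hmr
      have hf' : ((firstBlockLen digits d 0 : Nat) : Int) < (digits.count d : Int) := by exact_mod_cast hf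
      simp [hge3, hmr', hf']
    · have hf : ¬ firstBlockLen digits d 0 < digits.count d := fun h => hmr (hiff.mpr h)
      have hmr' : ¬ (mrMax digits d 0 : Int) < (digits.count d : Int) := by
        intro h; exact hmr (by exact_mod_cast h)
      have hf' : ¬ ((firstBlockLen digits d 0 : Nat) : Int) < (digits.count d : Int) := by
        intro h; exact hf (by exact_mod_cast h)
      simp [hmr', hf']
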